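-- pv_equiv track=rewrite | github.com/Aadhityan-Senthil/ai-quantum-circuit-optimizer | dashboard.py | find_optimization_targets
-- ===== SOURCE A (Python) =====
-- def find_optimization_targets(circuit_names):
--     """Find indices of gates that can be optimized (for highlighting)."""
--     targets = []
--     self_inverse = {'H', 'X', 'Z'}
--
--     for i in range(len(circuit_names) - 1):
--         if circuit_names[i] in self_inverse and circuit_names[i] == circuit_names[i + 1]:
--             targets.extend([i, i + 1])
--             break
--         if circuit_names[i] == 'S' and circuit_names[i + 1] == 'S':
--             targets.extend([i, i + 1])
--             break
--         if circuit_names[i] == 'T' and circuit_names[i + 1] == 'T':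
--             targets.extend([i, i + 1])
--             break
--
--     for i in range(len(circuit_names) - 2):
--         if (circuit_names[i] == 'H' and
--                 circuit_names[i + 1] == 'X' and
--                 circuit_names[i + 2] == 'H'):
--             targets.extend([i, i + 1, i + 2])
--             break
--
--     for i in range(len(circuit_names)):
--         if circuit_names[i] == 'I':
--             targets.append(i)
--             break
--
--     return targets
-- ===== SOURCE B (Python) =====
-- def find_optimization_targets(circuit_names):
--     """Find indices of gates that can be optimized (for highlighting)."""
--     n = len(circuit_names)
--     pair_idx = None
--     hxh_idx = None
--     i_idx = None
--     for i in range(n):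
--         if pair_idx is None and i + 1 < n \
--                 and circuit_names[i] == circuit_names[i + 1] \
--                 and circuit_names[i] in ('H', 'X', 'Z', 'S', 'T'):
--             pair_idx = i
--         if hxh_idx is None and i + 2 < n and circuit_names[i] == 'H' \
--                 and circuit_names[i + 1] == 'X' and circuit_names[i + 2] == 'H':
--             hxh_idx = i
--         if i_idx is None and circuit_names[i] == 'I':
--             i_idx = i
--     targets = []
--     if pair_idx is not None:
--         targets += [pair_idx, pair_idx + 1]
--     if hxh_idx is not None:
--         targets += [hxh_idx, hxh_idx + 1, hxh_idx + 2]
--     if i_idx is not None: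
--         targets.append(i_idx)
--     return targets
-- ===== Notes on version B (the rewrite author's own statement) =====
-- stated objective: alternative
-- what changed: Replaces A's three separate scans (each with its own break) by a single pass over the list maintaining three earliest-match slots, assembling the result afterwards in the fixed pair/HXH/I order.
import Mathlib
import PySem

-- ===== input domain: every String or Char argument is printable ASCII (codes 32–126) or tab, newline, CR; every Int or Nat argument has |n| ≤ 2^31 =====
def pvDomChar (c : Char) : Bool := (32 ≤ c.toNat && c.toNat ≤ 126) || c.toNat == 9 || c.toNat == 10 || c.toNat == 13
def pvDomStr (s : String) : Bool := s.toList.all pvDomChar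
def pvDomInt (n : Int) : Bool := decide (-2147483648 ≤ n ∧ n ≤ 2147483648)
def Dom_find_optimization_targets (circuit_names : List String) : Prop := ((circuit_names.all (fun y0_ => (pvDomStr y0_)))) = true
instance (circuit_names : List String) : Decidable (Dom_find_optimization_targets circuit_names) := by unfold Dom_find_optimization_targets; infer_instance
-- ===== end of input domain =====

-- B replaces A's three break-scans by one pass maintaining three earliest-match slots; objective: alternative (same cost).

-- ===== PORT A =====
-- first loop of A: i in range(len-1); extend [i, i+1] and break on the first firing branch
def pvALoop1 (cs : List String) (idxs : List Nat) (targets : List Int) : List Int :=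
  match idxs with
  | [] => targets
  | i :: rest =>
    if (cs.getD i "" = "H" ∨ cs.getD i "" = "X" ∨ cs.getD i "" = "Z") ∧
        cs.getD i "" = cs.getD (i+1) "" then
      targets ++ [(i : Int), (i : Int) + 1]
    else if cs.getD i "" = "S" ∧ cs.getD (i+1) "" = "S" then
      targets ++ [(i : Int), (i : Int) + 1]
    else if cs.getD i "" = "T" ∧ cs.getD (i+1) "" = "T" then
      targets ++ [(i : Int), (i : Int) + 1]
    else pvALoop1 cs rest targets

-- second loop of A: i in range(len-2); extend [i, i+1, i+2] and break when H, X, H is found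
def pvALoop2 (cs : List String) (idxs : List Nat) (targets : List Int) : List Int :=
  match idxs with
  | [] => targets
  | i :: rest =>
    if cs.getD i "" = "H" ∧ cs.getD (i+1) "" = "X" ∧ cs.getD (i+2) "" = "H" then
      targets ++ [(i : Int), (i : Int) + 1, (i : Int) + 2]
    else pvALoop2 cs rest targets

-- third loop of A: i in range(len); append i and break at the first 'I'
def pvALoop3 (cs : List String) (idxs : List Nat) (targets : List Int) : List Int :=
  match idxs with
  | [] => targets
  | i :: rest =>
    if cs.getD i "" = "I" then targets ++ [(i : Int)]
    else pvALoop3 cs rest targets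

def find_optimization_targets (circuit_names : List String) : List Int :=
  pvALoop3 circuit_names (List.range circuit_names.length)
    (pvALoop2 circuit_names (List.range (circuit_names.length - 2))
      (pvALoop1 circuit_names (List.range (circuit_names.length - 1)) []))

-- ===== PORT B =====
-- B's single pass: i runs over range(n); each slot is set only while still None
def pvBScan (cs : List String) (idxs : List Nat) (p hx ii : Option Nat) :
    Option Nat × Option Nat × Option Nat :=
  match idxs with
  | [] => (p, hx, ii)
  | i :: rest =>
    pvBScan cs rest
      (if p = none ∧ i + 1 < cs.length ∧ cs.getD i "" = cs.getD (i+1) "" ∧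
          (cs.getD i "" = "H" ∨ cs.getD i "" = "X" ∨ cs.getD i "" = "Z" ∨
           cs.getD i "" = "S" ∨ cs.getD i "" = "T") then some i else p)
      (if hx = none ∧ i + 2 < cs.length ∧ cs.getD i "" = "H" ∧
          cs.getD (i+1) "" = "X" ∧ cs.getD (i+2) "" = "H" then some i else hx)
      (if ii = none ∧ cs.getD i "" = "I" then some i else ii)

def find_optimization_targets_alt (circuit_names : List String) : List Int :=
  let r := pvBScan circuit_names (List.range circuit_names.length) none none none
  (match r.1 with | some j => [(j : Int), (j : Int) + 1] | none => []) ++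
  (match r.2.1 with | some j => [(j : Int), (j : Int) + 1, (j : Int) + 2] | none => []) ++
  (match r.2.2 with | some j => [(j : Int)] | none => [])

-- ===== PRECONDITION & SPEC =====
def Spec_find_optimization_targets (circuit_names : List String) (out : List Int) : Prop := out = find_optimization_targets_alt circuit_names
instance (circuit_names : List String) (out : List Int) : Decidable (Spec_find_optimization_targets circuit_names out) := by unfold Spec_find_optimization_targets; infer_instance

-- ===== CLAIM (what is proved, stated in full; the proofs are below) =====
def Claim_equal_find_optimization_targets : Prop := ∀ (circuit_names : List String), Dom_find_optimization_targets circuit_names → Spec_find_optimization_targets circuit_names (find_optimization_targets circuit_names)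

-- ===== LEMMAS AND PROOFS =====

def pvPairC (cs : List String) (j : Nat) : Bool :=
  (cs.getD j "" == cs.getD (j+1) "") &&
    (cs.getD j "" == "H" || cs.getD j "" == "X" || cs.getD j "" == "Z" ||
     cs.getD j "" == "S" || cs.getD j "" == "T")

def pvHxhC (cs : List String) (j : Nat) : Bool :=
  (cs.getD j "" == "H") && (cs.getD (j+1) "" == "X") && (cs.getD (j+2) "" == "H")

def pvIC (cs : List String) (j : Nat) : Bool := cs.getD j "" == "I"

theorem pvPairC_iff (cs : List String) (j : Nat) :
    pvPairC cs j = true ↔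
      (cs.getD j "" = cs.getD (j+1) "" ∧
        (cs.getD j "" = "H" ∨ cs.getD j "" = "X" ∨ cs.getD j "" = "Z" ∨
         cs.getD j "" = "S" ∨ cs.getD j "" = "T")) := by
  simp [pvPairC]
  tauto

theorem pvHxhC_iff (cs : List String) (j : Nat) :
    pvHxhC cs j = true ↔
      (cs.getD j "" = "H" ∧ cs.getD (j+1) "" = "X" ∧ cs.getD (j+2) "" = "H") := by
  simp [pvHxhC]
  tauto

theorem pvIC_iff (cs : List String) (j : Nat) : pvIC cs j = true ↔ cs.getD j "" = "I" := by
  simp [pvIC]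

def pvOut2 : Option Nat → List Int
  | some j => [(j : Int), (j : Int) + 1]
  | none => []

def pvOut3 : Option Nat → List Int
  | some j => [(j : Int), (j : Int) + 1, (j : Int) + 2]
  | none => []

def pvOut1 : Option Nat → List Int
  | some j => [(j : Int)]
  | none => []

theorem pvALoop1_eq (cs : List String) (idxs : List Nat) (t : List Int) :
    pvALoop1 cs idxs t = t ++ pvOut2 (idxs.find? (pvPairC cs)) := by
  induction idxs with
  | nil => simp [pvALoop1, pvOut2]
  | cons i rest ih =>
    cases hc : pvPairC cs i with
    | true =>
      rw [pvALoop1, List.find?_cons_of_pos hc]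
      obtain ⟨he, hm⟩ := (pvPairC_iff cs i).mp hc
      split_ifs with h1 h2 h3
      · simp [pvOut2]
      · simp [pvOut2]
      · simp [pvOut2]
      · exfalso
        rcases hm with hm|hm|hm|hm|hm
        · exact h1 ⟨Or.inl hm, he⟩
        · exact h1 ⟨Or.inr (Or.inl hm), he⟩
        · exact h1 ⟨Or.inr (Or.inr hm), he⟩
        · exact h2 ⟨hm, by rw [← he]; exact hm⟩
        · exact h3 ⟨hm, by rw [← he]; exact hm⟩
    | false =>
      rw [pvALoop1, List.find?_cons_of_neg (by simp [hc])]
      have hp' : ¬ pvPairC cs i = true := by simp [hc]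
      have hb1 : ¬ ((cs.getD i "" = "H" ∨ cs.getD i "" = "X" ∨ cs.getD i "" = "Z") ∧
          cs.getD i "" = cs.getD (i+1) "") := fun h =>
        hp' ((pvPairC_iff cs i).mpr ⟨h.2, by tauto⟩)
      have hb2 : ¬ (cs.getD i "" = "S" ∧ cs.getD (i+1) "" = "S") := fun h =>
        hp' ((pvPairC_iff cs i).mpr ⟨by rw [h.1, h.2], by tauto⟩)
      have hb3 : ¬ (cs.getD i "" = "T" ∧ cs.getD (i+1) "" = "T") := fun h =>
        hp' ((pvPairC_iff cs i).mpr ⟨by rw [h.1, h.2], by tauto⟩)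
      rw [if_neg hb1, if_neg hb2, if_neg hb3]
      exact ih

theorem pvALoop2_eq (cs : List String) (idxs : List Nat) (t : List Int) :
    pvALoop2 cs idxs t = t ++ pvOut3 (idxs.find? (pvHxhC cs)) := by
  induction idxs with
  | nil => simp [pvALoop2, pvOut3]
  | cons i rest ih =>
    cases hc : pvHxhC cs i with
    | true =>
      rw [pvALoop2, List.find?_cons_of_pos hc]
      rw [if_pos ((pvHxhC_iff cs i).mp hc)]
      simp [pvOut3]
    | false =>
      rw [pvALoop2, List.find?_cons_of_neg (by simp [hc])]
      rw [if_neg (fun h => by simp [(pvHxhC_iff cs i).mpr h] at hc)]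
      exact ih
  
theorem pvALoop3_eq (cs : List String) (idxs : List Nat) (t : List Int) :
    pvALoop3 cs idxs t = t ++ pvOut1 (idxs.find? (pvIC cs)) := by
  induction idxs with
  | nil => simp [pvALoop3, pvOut1]
  | cons i rest ih =>
    cases hc : pvIC cs i with
    | true =>
      rw [pvALoop3, List.find?_cons_of_pos hc]
      rw [if_pos ((pvIC_iff cs i).mp hc)]
      simp [pvOut1]
    | false =>
      rw [pvALoop3, List.find?_cons_of_neg (by simp [hc])]
      rw [if_neg (fun h => by simp [(pvIC_iff cs i).mpr h] at hc)]
      exact ih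

-- advancing one slot of B's scan by one step keeps the "slot, else first match from here" reading
theorem pvSlotStep (i : Nat) (rest : List Nat) (c : Nat → Bool)
    (q : Prop) [Decidable q] (hq : q ↔ c i = true) (p : Option Nat) :
    (if p = none ∧ q then some i else p).orElse (fun _ => rest.find? c) =
      p.orElse (fun _ => (i :: rest).find? c) := by
  cases p with
  | some a => simp
  | none =>
    by_cases hc : c i = true
    · rw [List.find?_cons_of_pos hc]
      simp [hq, hc, Option.orElse]
    · rw [List.find?_cons_of_neg (by simpa using hc)]
      simp [hq, hc, Option.orElse]

theorem pvBScan_eq (cs : List String) (idxs : List Nat) (p hx ii : Option Nat) :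
    pvBScan cs idxs p hx ii =
      (p.orElse (fun _ => idxs.find? (fun j => decide (j + 1 < cs.length) && pvPairC cs j)),
       hx.orElse (fun _ => idxs.find? (fun j => decide (j + 2 < cs.length) && pvHxhC cs j)),
       ii.orElse (fun _ => idxs.find? (pvIC cs))) := by
  induction idxs generalizing p hx ii with
  | nil => cases p <;> cases hx <;> cases ii <;> simp [pvBScan, Option.orElse]
  | cons i rest ih =>
    rw [pvBScan, ih]
    refine Prod.ext ?_ (Prod.ext ?_ ?_)
    · refine pvSlotStep i rest _ _ ?_ p
      simp only [Bool.and_eq_true, decide_eq_true_eq, pvPairC_iff]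
    · refine pvSlotStep i rest _ _ ?_ hx
      simp only [Bool.and_eq_true, decide_eq_true_eq, pvHxhC_iff]
    · refine pvSlotStep i rest _ _ ?_ ii
      simp only [pvIC_iff]

theorem pvFind?_congr_mem {α : Type} (l : List α) (f g : α → Bool)
    (h : ∀ a ∈ l, f a = g a) : l.find? f = l.find? g := by
  induction l with
  | nil => rfl
  | cons a l ih =>
    have ha := h a (by simp)
    cases hg : g a with
    | true =>
      rw [List.find?_cons_of_pos (by rw [ha]; exact hg), List.find?_cons_of_pos hg]
    | false =>
      rw [List.find?_cons_of_neg (by simp [ha, hg]), List.find?_cons_of_neg (by simp [hg])]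
      exact ih (fun b hb => h b (by simp [hb]))

-- scanning range n for (j + k < n ∧ c j) is scanning range (n - k) for c
theorem pvRangeShift (n k : Nat) (c : Nat → Bool) :
    (List.range n).find? (fun j => decide (j + k < n) && c j) = (List.range (n - k)).find? c := by
  by_cases hk : k ≤ n
  · obtain ⟨m, rfl⟩ : ∃ m, n = m + k := ⟨n - k, by omega⟩
    simp only [Nat.add_sub_cancel]
    rw [List.range_add, List.find?_append]
    have h1 : (List.range m).find? (fun j => decide (j + k < m + k) && c j) =
        (List.range m).find? c := by
      refine pvFind?_congr_mem _ _ _ (fun a ha => ?_)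
      have := List.mem_range.mp ha
      simp [show a + k < m + k by omega]
    have h2 : ((List.range k).map (m + ·)).find?
        (fun j => decide (j + k < m + k) && c j) = none := by
      rw [List.find?_eq_none]
      intro a ha
      simp only [List.mem_map, List.mem_range] at ha
      obtain ⟨b, hb, rfl⟩ := ha
      simp [show ¬ (m + b + k < m + k) by omega]
    rw [h1, h2]
    cases h3 : (List.range m).find? c <;> simp [Option.orElse]
  · rw [show n - k = 0 by omega]
    simp only [List.range_zero, List.find?_nil]
    rw [List.find?_eq_none]
    intro a ha
    have := List.mem_range.mp ha
    simp [show ¬ (a + k < n) by omega]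

-- ===== VERDICT (by name: the statement is the Claim_ definition above) =====
theorem find_optimization_targets_spec : Claim_equal_find_optimization_targets := by
  intro cs _
  unfold Spec_find_optimization_targets find_optimization_targets find_optimization_targets_alt
  rw [pvALoop1_eq, pvALoop2_eq, pvALoop3_eq, pvBScan_eq,
      pvRangeShift cs.length 1 (pvPairC cs), pvRangeShift cs.length 2 (pvHxhC cs)]
  simp only [Option.orElse, List.nil_append, List.append_assoc]
  rcases (List.range (cs.length - 1)).find? (pvPairC cs) with _ | j <;>
    rcases (List.range (cs.length - 2)).find? (pvHxhC cs) with _ | j2 <;>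
    rcases (List.range cs.length).find? (pvIC cs) with _ | j3 <;>
    simp [pvOut1, pvOut2, pvOut3]
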